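-- pv_equiv track=rewrite | github.com/hkjeon13/gemeinschaft | app/services/conversation_store.py | _normalize_content_blocks
-- ===== SOURCE A (Python) =====
-- from typing import Any, Dict, List, Optional
--
-- _TEXT_CONTENT_TYPES = {"text", "input_text", "output_text"}
--
-- _IMAGE_CONTENT_TYPES = {"image_url", "input_image", "output_image"}
--
-- def _normalize_content_blocks(content: Any) -> List[Dict[str, Any]]:
--     if not isinstance(content, list):
--         return []
--
--     normalized: List[Dict[str, Any]] = []
--     for item in content:
--         if not isinstance(item, dict):
--             continue
--         block_type = str(item.get("type", "")).strip().lower()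
--         if not block_type:
--             continue
--
--         if block_type in _TEXT_CONTENT_TYPES:
--             text = str(item.get("text", "")).strip()
--             if not text:
--                 continue
--             normalized.append({"type": "input_text" if block_type == "text" else block_type, "text": text})
--             continue
--
--         if block_type in _IMAGE_CONTENT_TYPES:
--             image_url = str(item.get("image_url", "")).strip()
--             if not image_url:
--                 continue
--             normalized.append({"type": "input_image" if block_type == "image_url" else block_type, "image_url": image_url})
--             continue
--
--     return normalized
-- ===== SOURCE B (Python) =====
-- from typing import Any, Dict, List
--
-- def _classify(block_type):
--     """Decompose a normalized type string into (output type, source/output key).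
--
--     Instead of enumerating the accepted type names, peel an optional
--     'input_'/'output_' direction prefix off the string and inspect the base:
--     base 'text' is a text block, base 'image' (with an explicit prefix) or the
--     bare alias 'image_url' is an image block; a missing prefix defaults to
--     'input_'. Returns None for unrecognized types (including the empty string).
--     """
--     if block_type == "image_url":
--         return "input_image", "image_url"
--     for prefix in ("input_", "output_"):
--         if block_type.startswith(prefix):
--             base = block_type[len(prefix):]
--             if base == "text":
--                 return block_type, "text"
--             if base == "image":
--                 return block_type, "image_url"
--             return None
--     if block_type == "text":
--         return "input_text", "text"
--     return None
--
-- def _normalize_content_blocks(content: Any) -> List[Dict[str, Any]]: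
--     if not isinstance(content, list):
--         return []
--     normalized: List[Dict[str, Any]] = []
--     for item in content:
--         if not isinstance(item, dict):
--             continue
--         rule = _classify(str(item.get("type", "")).strip().lower())
--         if rule is None:
--             continue
--         out_type, key = rule
--         value = str(item.get(key, "")).strip()
--         if value:
--             normalized.append({"type": out_type, key: value})
--     return normalized
-- ===== Notes on version B (the rewrite author's own statement) =====
-- stated objective: alternative
-- what changed: B derives the block's category and output name arithmetically from the type string itself - peeling an optional 'input_'/'output_' direction prefix and inspecting the remaining base ('text'/'image', with 'image_url' as the bare alias and 'input_' as the default prefix) - instead of A's enumeration of membership sets with per-branch rename conditionals; empty types fall out of the classification with no separate check.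
import Mathlib
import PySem

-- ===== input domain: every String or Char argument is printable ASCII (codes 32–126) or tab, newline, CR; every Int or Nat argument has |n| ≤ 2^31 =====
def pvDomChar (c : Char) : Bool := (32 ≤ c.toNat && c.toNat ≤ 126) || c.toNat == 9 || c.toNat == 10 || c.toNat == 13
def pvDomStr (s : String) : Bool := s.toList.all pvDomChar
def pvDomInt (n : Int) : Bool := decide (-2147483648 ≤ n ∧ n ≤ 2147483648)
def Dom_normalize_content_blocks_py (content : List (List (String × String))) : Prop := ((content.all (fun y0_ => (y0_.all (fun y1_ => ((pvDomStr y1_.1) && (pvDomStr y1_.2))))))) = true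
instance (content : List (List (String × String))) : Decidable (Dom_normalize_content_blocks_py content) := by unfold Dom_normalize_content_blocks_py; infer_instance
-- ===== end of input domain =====

-- B classifies a block by peeling an optional 'input_'/'output_' prefix off the type string
-- and inspecting the base, instead of A's membership sets with rename conditionals (same O(n)).

-- ===== PORT A =====
-- literal transliteration of A's append loop; dicts are association lists, item.get(k, "") = (item.lookup k).getD ""
def normalize_content_blocks_py (content : List (List (String × String))) : List (List (String × String)) :=
  content.foldl (fun normalized item =>
    let block_type := PySem.Str.lower (PySem.Str.strip ((item.lookup "type").getD ""))
    if block_type = "" then normalized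
    else if block_type ∈ (["text", "input_text", "output_text"] : List String) then
      let text := PySem.Str.strip ((item.lookup "text").getD "")
      if text = "" then normalized
      else normalized ++ [[("type", if block_type = "text" then "input_text" else block_type), ("text", text)]]
    else if block_type ∈ (["image_url", "input_image", "output_image"] : List String) then
      let image_url := PySem.Str.strip ((item.lookup "image_url").getD "")
      if image_url = "" then normalized
      else normalized ++ [[("type", if block_type = "image_url" then "input_image" else block_type), ("image_url", image_url)]]
    else normalized) []

-- ===== PORT B =====
-- base inspection after an explicit prefix was peeled: block_type[len(prefix):]
def pvBase (block_type base : String) : Option (String × String) :=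
  if base = "text" then some (block_type, "text")
  else if base = "image" then some (block_type, "image_url")
  else none

-- _classify: decompose the normalized type string into (output type, source/output key)
def pvClassify (block_type : String) : Option (String × String) :=
  if block_type = "image_url" then some ("input_image", "image_url")
  else if PySem.Str.startswith block_type "input_" then pvBase block_type (PySem.Str.slice block_type (some 6) none)
  else if PySem.Str.startswith block_type "output_" then pvBase block_type (PySem.Str.slice block_type (some 7) none)
  else if block_type = "text" then some ("input_text", "text")
  else none

def normalize_content_blocks_py_alt (content : List (List (String × String))) : List (List (String × String)) :=
  content.foldl (fun normalized item =>
    match pvClassify (PySem.Str.lower (PySem.Str.strip ((item.lookup "type").getD ""))) with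
    | none => normalized
    | some (out_type, key) =>
      let value := PySem.Str.strip ((item.lookup key).getD "")
      if value = "" then normalized
      else normalized ++ [[("type", out_type), (key, value)]]) []

-- ===== PRECONDITION & SPEC =====
def Spec_normalize_content_blocks_py (content : List (List (String × String))) (out : List (List (String × String))) : Prop := out = normalize_content_blocks_py_alt content
instance (content : List (List (String × String))) (out : List (List (String × String))) : Decidable (Spec_normalize_content_blocks_py content out) := by unfold Spec_normalize_content_blocks_py; infer_instance

-- ===== CLAIM (what is proved, stated in full; the proofs are below) =====
def Claim_equal_normalize_content_blocks_py : Prop := ∀ (content : List (List (String × String))), Dom_normalize_content_blocks_py content → Spec_normalize_content_blocks_py content (normalize_content_blocks_py content)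

-- ===== LEMMAS AND PROOFS =====

-- a string starting with "input_" whose remainder is "text" IS "input_text" (and so on)
theorem pv_prefix_rest (t p r : String) (hp : PySem.Str.startswith t p = true)
    (hr : PySem.Str.slice t (some (p.toList.length : Int)) none = r) : t = p ++ r := by
  rw [show PySem.Str.startswith t p = PySem.Chars.startswith t.toList p.toList from by simp] at hp
  have hpre : p.toList <+: t.toList := (PySem.Chars.startswith_iff _ _).mp hp
  obtain ⟨rest, hrest⟩ := hpre
  have h2 : r.toList = t.toList.drop p.toList.length := by
    rw [← hr]
    simp [PySem.Str.slice, PySem.Chars.slice_eq_listSlice, PySem.List.slice_from_natCast]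
  have : t.toList = p.toList ++ r.toList := by
    rw [h2, ← hrest]; simp
  have h3 : t.toList = (p ++ r).toList := by simpa using this
  exact String.toList_injective h3

-- pvClassify returns none on every string outside the six recognized types
theorem pv_classify_none (t : String)
    (h1 : t ≠ "text") (h2 : t ≠ "input_text") (h3 : t ≠ "output_text")
    (h4 : t ≠ "image_url") (h5 : t ≠ "input_image") (h6 : t ≠ "output_image") :
    pvClassify t = none := by
  unfold pvClassify
  rw [if_neg h4]
  by_cases hi : PySem.Str.startswith t "input_" = true
  · rw [if_pos hi]
    unfold pvBase
    rw [if_neg, if_neg]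
    · intro hb
      exact h5 (pv_prefix_rest t "input_" "image" hi (by simpa using hb))
    · intro hb
      exact h2 (pv_prefix_rest t "input_" "text" hi (by simpa using hb))
  · rw [if_neg hi]
    by_cases ho : PySem.Str.startswith t "output_" = true
    · rw [if_pos ho]
      unfold pvBase
      rw [if_neg, if_neg]
      · intro hb
        exact h6 (pv_prefix_rest t "output_" "image" ho (by simpa using hb))
      · intro hb
        exact h3 (pv_prefix_rest t "output_" "text" ho (by simpa using hb))
    · rw [if_neg ho, if_neg h1]

-- per-item agreement of the two loop bodies
theorem pv_step_eq (acc : List (List (String × String))) (item : List (String × String)) :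
    (let block_type := PySem.Str.lower (PySem.Str.strip ((item.lookup "type").getD ""))
     if block_type = "" then acc
     else if block_type ∈ (["text", "input_text", "output_text"] : List String) then
       let text := PySem.Str.strip ((item.lookup "text").getD "")
       if text = "" then acc
       else acc ++ [[("type", if block_type = "text" then "input_text" else block_type), ("text", text)]]
     else if block_type ∈ (["image_url", "input_image", "output_image"] : List String) then
       let image_url := PySem.Str.strip ((item.lookup "image_url").getD "")
       if image_url = "" then acc
       else acc ++ [[("type", if block_type = "image_url" then "input_image" else block_type), ("image_url", image_url)]]
     else acc)
    = (match pvClassify (PySem.Str.lower (PySem.Str.strip ((item.lookup "type").getD ""))) with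
       | none => acc
       | some (out_type, key) =>
         let value := PySem.Str.strip ((item.lookup key).getD "")
         if value = "" then acc
         else acc ++ [[("type", out_type), (key, value)]]) := by
  set bt := PySem.Str.lower (PySem.Str.strip ((item.lookup "type").getD "")) with hbt
  by_cases h1 : bt = "text"
  · simp [h1, show pvClassify "text" = some ("input_text", "text") from rfl]
  · by_cases h2 : bt = "input_text"
    · simp [h2, show pvClassify "input_text" = some ("input_text", "text") from rfl]
    · by_cases h3 : bt = "output_text"
      · simp [h3, show pvClassify "output_text" = some ("output_text", "text") from rfl]
      · by_cases h4 : bt = "image_url"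
        · simp [h4, show pvClassify "image_url" = some ("input_image", "image_url") from rfl]
        · by_cases h5 : bt = "input_image"
          · simp [h5, show pvClassify "input_image" = some ("input_image", "image_url") from rfl]
          · by_cases h6 : bt = "output_image"
            · simp [h6, show pvClassify "output_image" = some ("output_image", "image_url") from rfl]
            · have hcn := pv_classify_none bt h1 h2 h3 h4 h5 h6
              simp [hcn, h1, h2, h3, h4, h5, h6]

-- ===== VERDICT (by name: the statement is the Claim_ definition above) =====
theorem normalize_content_blocks_py_spec : Claim_equal_normalize_content_blocks_py := by
  intro content _
  show normalize_content_blocks_py content = normalize_content_blocks_py_alt content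
  unfold normalize_content_blocks_py normalize_content_blocks_py_alt
  exact PySem.List.foldl_congr_mem content _ _ [] (fun acc x _ => pv_step_eq acc x)
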